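-- pv_equiv track=rewrite | github.com/demianelnecave/laboDatos | tarea_clase_04.py | superanSalarioActividad04
-- ===== SOURCE A (Python) =====
-- def superanSalarioActividad04(A, umbral):
--     res = []
--     for col in range(len(A[2])):
--         empleado= []
--         if A[2][col] > umbral:
--             for fila in A:
--                 empleado.append(fila[col])
--             res.append(empleado)
--     return res
-- ===== SOURCE B (Python) =====
-- def superanSalarioActividad04(A, umbral):
--     mask = [s > umbral for s in A[2]]
--     kept = [[x for x, keep in zip(row, mask) if keep] for row in A]
--     return [[row[j] for row in kept] for j in range(sum(mask))]
-- ===== Notes on version B (the rewrite author's own statement) =====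
-- stated objective: alternative
-- what changed: B works row-wise in staged passes: it builds a boolean mask from the salary row, compacts every row against the mask in one zip pass, and finally transposes the compacted rows, instead of gathering each passing column by per-row indexing inside a nested column loop.
import Mathlib
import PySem

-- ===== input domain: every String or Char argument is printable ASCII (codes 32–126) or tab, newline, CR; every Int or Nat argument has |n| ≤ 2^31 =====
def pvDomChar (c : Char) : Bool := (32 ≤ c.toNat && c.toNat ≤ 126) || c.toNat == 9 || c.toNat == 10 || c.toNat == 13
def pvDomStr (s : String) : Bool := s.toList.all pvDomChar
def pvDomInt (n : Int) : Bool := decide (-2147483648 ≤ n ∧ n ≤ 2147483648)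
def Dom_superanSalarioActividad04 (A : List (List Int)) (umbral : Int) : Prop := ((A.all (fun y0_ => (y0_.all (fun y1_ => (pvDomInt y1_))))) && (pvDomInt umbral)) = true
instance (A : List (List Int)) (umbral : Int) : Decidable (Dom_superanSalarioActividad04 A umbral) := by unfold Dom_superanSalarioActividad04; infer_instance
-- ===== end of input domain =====

-- B filters row-wise in staged passes (salary mask, row compaction, transpose) instead of A's per-column gathering; same cost, alternative algorithm.


-- ===== PORT A =====
def superanSalarioActividad04 (A : List (List Int)) (umbral : Int) : List (List Int) :=
  let a2 := (PySem.List.pyGet? A 2).getD []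
  (List.range a2.length).foldl (fun res col =>
    if PySem.List.pyGetD a2 (col : Int) 0 > umbral then
      res ++ [A.foldl (fun emp fila => emp ++ [PySem.List.pyGetD fila (col : Int) 0]) []]
    else res) []

-- ===== PORT B =====
-- mask = [s > umbral for s in A[2]]; kept = rows compacted against the mask via zip;
-- row[j] for j in range(sum(mask)) → pyGetD (exact for the in-range indices Pre_ guarantees).
def superanSalarioActividad04_alt (A : List (List Int)) (umbral : Int) : List (List Int) :=
  let mask := ((PySem.List.pyGet? A 2).getD []).map (fun s => decide (s > umbral))
  let kept := A.map (fun row => ((row.zip mask).filter (fun q => q.2)).map (fun q => q.1))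
  (List.range (mask.count true)).map (fun (j : Nat) => kept.map (fun row => PySem.List.pyGetD row (j : Int) 0))

-- ===== PRECONDITION & SPEC =====
-- Pre_ is exactly where A returns: A has at least 3 rows (else A[2] raises IndexError) and every
-- column index whose salary passes the threshold lies within every row (else fila[col] raises).
def Pre_superanSalarioActividad04 (A : List (List Int)) (umbral : Int) : Prop :=
  3 ≤ A.length ∧
  ∀ i < (A.getD 2 []).length, (A.getD 2 []).getD i 0 > umbral → ∀ r ∈ A, i < r.length

instance (A : List (List Int)) (umbral : Int) : Decidable (Pre_superanSalarioActividad04 A umbral) := by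
  unfold Pre_superanSalarioActividad04; infer_instance

def pvWitness_superanSalarioActividad04 : List (List Int) × Int :=
  ([[1, 2, 3], [4, 5, 6], [7, 8, 9]], 7)

def Spec_superanSalarioActividad04 (A : List (List Int)) (umbral : Int) (out : List (List Int)) : Prop := out = superanSalarioActividad04_alt A umbral
instance (A : List (List Int)) (umbral : Int) (out : List (List Int)) : Decidable (Spec_superanSalarioActividad04 A umbral out) := by unfold Spec_superanSalarioActividad04; infer_instance

-- ===== CLAIM (what is proved, stated in full; the proofs are below) =====
def Claim_equal_superanSalarioActividad04 : Prop := ∀ (A : List (List Int)) (umbral : Int), Dom_superanSalarioActividad04 A umbral → Pre_superanSalarioActividad04 A umbral → Spec_superanSalarioActividad04 A umbral (superanSalarioActividad04 A umbral)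

-- ===== LEMMAS AND PROOFS =====

-- true-count of the mask = number of passing column indices
theorem count_true_map (p : Int → Bool) (l : List Int) :
    (l.map p).count true
      = ((List.range l.length).filter (fun i => p (l.getD i 0))).length := by
  induction l with
  | nil => simp
  | cons s t ih =>
    rw [List.map_cons, List.count_cons, ih]
    simp only [List.length_cons, List.range_succ_eq_map, List.filter_cons,
      List.filter_map, Function.comp_def, List.getD_cons_zero, List.getD_cons_succ]
    by_cases hs : p s = true <;> simp [hs]

-- compacting a row against the mask = picking the passing indices out of the row
theorem zipSel (p : Int → Bool) (a2 : List Int) : ∀ (row : List Int),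
    (∀ i, i < a2.length → p (a2.getD i 0) = true → i < row.length) →
    ((row.zip (a2.map p)).filter (fun q => q.2)).map (fun q => q.1)
      = ((List.range a2.length).filter (fun i => p (a2.getD i 0))).map (fun i => row.getD i 0) := by
  induction a2 with
  | nil => intro row _; simp
  | cons s t ih =>
    intro row h
    cases row with
    | nil =>
      have hall : (List.range (s :: t).length).filter
          (fun i => p ((s :: t).getD i 0)) = [] := by
        rw [List.filter_eq_nil_iff]
        intro i hi hp
        exact absurd (h i (List.mem_range.mp hi) hp) (by simp)
      simp only [List.zip_nil_left, List.filter_nil, List.map_nil, hall]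
    | cons x r =>
      have ht := ih r (fun i hi hp => by
        have h2 := h (i + 1) (by simpa using hi) (by simpa using hp)
        simp only [List.length_cons] at h2; omega)
      simp only [List.zip_cons_cons, List.map_cons, List.filter_cons, List.length_cons,
        List.range_succ_eq_map, List.filter_map, Function.comp_def,
        List.getD_cons_zero, List.getD_cons_succ] at *
      by_cases hs : p s = true <;> simp [hs, ht, List.map_map, Function.comp_def]

-- a map over a list = a map over the range of its positions
theorem map_eq_map_range {α β : Type} (f : α → β) (d : α) (l : List α) :
    l.map f = (List.range l.length).map (fun j => f (l.getD j d)) := by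
  apply List.ext_getElem
  · simp
  · intro i h1 h2
    have hi : i < l.length := by simpa using h1
    simp [List.getElem?_eq_getElem hi]

theorem superanSalarioActividad04_spec : Claim_equal_superanSalarioActividad04 := by
  intro A umbral _ hpre
  unfold Spec_superanSalarioActividad04
  obtain ⟨hlen, hcols⟩ := hpre
  match A, hlen with
  | a0 :: a1 :: a2 :: rest, _ =>
    set A := a0 :: a1 :: a2 :: rest with hA
    have ha2 : A.getD 2 [] = a2 := by simp [hA]
    rw [ha2] at hcols
    have hget : (PySem.List.pyGet? A 2).getD [] = a2 := by
      have h2 : (2:Int) ≤ (rest.length : Int) + 1 + 1 := by omega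
      simp [hA, PySem.List.pyGet?, PySem.List.pyIdx?, h2]
    set p : Int → Bool := fun s => decide (s > umbral) with hp
    set P := (List.range a2.length).filter (fun i => p (a2.getD i 0)) with hP
    -- port A in filter/map form
    have hAform : superanSalarioActividad04 A umbral =
        P.map (fun i => A.map (fun row => row.getD i 0)) := by
      unfold superanSalarioActividad04
      simp only [hget, PySem.List.foldl_append_singleton_eq_map, List.nil_append]
      rw [PySem.List.foldl_append_ite]
      simp only [List.nil_append, List.pure_def, List.bind_eq_flatMap]
      rw [← List.map_eq_flatMap, List.filter_map, List.map_map]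
      simp [hP, hp, Function.comp_def]
    -- port B in the same form
    have hcount : ((a2.map p).count true) = P.length := by
      rw [count_true_map, hP]
    have hBform : superanSalarioActividad04_alt A umbral =
        P.map (fun i => A.map (fun row => row.getD i 0)) := by
      unfold superanSalarioActividad04_alt
      simp only [hget]
      have hkept : A.map (fun row => ((row.zip (a2.map p)).filter (fun q => q.2)).map (fun q => q.1))
          = A.map (fun row => P.map (fun i => row.getD i 0)) := by
        apply List.map_congr_left
        intro row hrow
        exact zipSel p a2 row (fun i hi hpi => hcols i hi (by simpa [hp] using hpi) row hrow)
      rw [hkept, hcount]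
      rw [map_eq_map_range (fun i => A.map (fun row => row.getD i 0)) 0 P]
      apply List.map_congr_left
      intro j hj
      have hjlt : j < P.length := List.mem_range.mp hj
      simp only [PySem.List.pyGetD_natCast, List.map_map, Function.comp_def]
      apply List.map_congr_left
      intro row _
      rw [List.getD_eq_getElem _ _ (by simpa using hjlt), List.getElem_map,
        List.getD_eq_getElem _ _ hjlt]
    rw [hAform, hBform]
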